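-- pv_equiv track=rewrite | github.com/SIXTH-SENSE-ENTERPRISE/optqo-platform-ide | script.py | parse_claude_natural
-- ===== SOURCE A (Python) =====
-- def parse_claude_natural(input_string):
--     """
--     Parse Claude's natural function call format, handling any content gracefully
--     Works with: fileManager('operation', 'path', 'any content including CSS/HTML')
--     """
--     if not input_string or 'fileManager(' not in input_string:
--         return None
--
--     try:
--         # Find the function call
--         start = input_string.find('fileManager(') + 12  # Length of 'fileManager('
--
--         # Find the matching closing parenthesis
--         paren_count = 1
--         end = start
--         in_quote = False
--         quote_char = None
--
--         for i in range(start, len(input_string)):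
--             char = input_string[i]
--
--             # Handle quotes
--             if char in ["'", '"'] and not in_quote:
--                 in_quote = True
--                 quote_char = char
--             elif char == quote_char and in_quote:
--                 in_quote = False
--                 quote_char = None
--             elif not in_quote:
--                 if char == '(':
--                     paren_count += 1
--                 elif char == ')':
--                     paren_count -= 1
--                     if paren_count == 0:
--                         end = i
--                         break
--
--         # Extract arguments string
--         args_str = input_string[start:end]
--
--         # Simple split by comma, but only outside quotes
--         args = []
--         current_arg = ""
--         in_quote = False
--         quote_char = None
--
--         for char in args_str:
--             if char in ["'", '"'] and not in_quote:
--                 in_quote = True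
--                 quote_char = char
--             elif char == quote_char and in_quote:
--                 in_quote = False
--                 quote_char = None
--             elif char == ',' and not in_quote:
--                 args.append(current_arg.strip().strip('\'"'))
--                 current_arg = ""
--                 continue
--
--             current_arg += char
--
--         # Add the last argument
--         if current_arg.strip():
--             args.append(current_arg.strip().strip('\'"'))
--
--         return args
--
--     except Exception:
--         # If parsing fails, return None and let other methods handle it
--         return None
-- ===== SOURCE B (Python) =====
-- def parse_claude_natural(input_string):
--     """Single fused left-to-right pass after 'fileManager(' that tracks quotes,
--     paren depth and the current argument at once (no separate end-finding scan)."""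
--     if not input_string or 'fileManager(' not in input_string:
--         return None
--     pos = input_string.find('fileManager(') + 12
--     in_quote = False
--     quote_char = None
--     paren_count = 1
--     current_arg = ""
--     args = []
--     closed = False
--     for char in input_string[pos:]:
--         if char in ("'", '"') and not in_quote:
--             in_quote = True
--             quote_char = char
--         elif char == quote_char and in_quote:
--             in_quote = False
--             quote_char = None
--         elif not in_quote:
--             if char == '(':
--                 paren_count += 1
--             elif char == ')':
--                 paren_count -= 1
--                 if paren_count == 0:
--                     closed = True
--                     break
--             elif char == ',':
--                 args.append(current_arg.strip().strip('\'"'))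
--                 current_arg = ""
--                 continue
--         current_arg += char
--     if not closed:
--         # the call was never closed: A's end==start behaviour, no arguments
--         return []
--     if current_arg.strip():
--         args.append(current_arg.strip().strip('\'"'))
--     return args
-- ===== Notes on version B (the rewrite author's own statement) =====
-- stated objective: alternative
-- what changed: B fuses A's two scans (find the matching ')' over the whole tail, then re-scan the extracted slice to split on commas) into one left-to-right pass that tracks quote state, paren depth and the current argument simultaneously, so the argument slice is never re-traversed.
import Mathlib
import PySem

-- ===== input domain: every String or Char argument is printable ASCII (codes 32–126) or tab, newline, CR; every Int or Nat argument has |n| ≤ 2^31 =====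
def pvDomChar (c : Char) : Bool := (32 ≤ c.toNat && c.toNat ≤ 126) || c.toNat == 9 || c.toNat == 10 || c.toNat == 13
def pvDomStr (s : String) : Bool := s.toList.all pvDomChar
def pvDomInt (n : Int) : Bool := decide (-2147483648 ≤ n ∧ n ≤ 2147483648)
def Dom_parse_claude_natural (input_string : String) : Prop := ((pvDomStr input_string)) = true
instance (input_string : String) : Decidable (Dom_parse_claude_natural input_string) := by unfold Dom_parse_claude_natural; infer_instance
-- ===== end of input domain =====

-- B fuses A's two scans (find the closing ')' then re-scan the slice to split on commas)
-- into one pass; equivalence is proved for the return value (A mutates nothing).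

-- shared by both Pythons: current_arg.strip().strip('\'"')
def pvFlush (cur : List Char) : List Char :=
  PySem.Chars.stripChars (PySem.Chars.strip cur) ['\'', '"']

-- ===== PORT A =====
-- A's first loop: scan from 'start', return end - start (offset of the matching ')'), none if never closed
def pvLoop1 : List Char → Option Char → Int → Option Nat
  | [], _, _ => none
  | c :: rest, q, pc =>
    if (c == '\'' || c == '"') && q.isNone then (pvLoop1 rest (some c) pc).map (· + 1)
    else if q == some c then (pvLoop1 rest none pc).map (· + 1)
    else if q.isNone then
      if c == '(' then (pvLoop1 rest q (pc + 1)).map (· + 1)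
      else if c == ')' then
        if pc - 1 == 0 then some 0 else (pvLoop1 rest q (pc - 1)).map (· + 1)
      else (pvLoop1 rest q pc).map (· + 1)
    else (pvLoop1 rest q pc).map (· + 1)

-- A's second loop over args_str: split on commas outside quotes
def pvLoop2 : List Char → Option Char → List Char → List (List Char) → List Char × List (List Char)
  | [], _, cur, args => (cur, args)
  | c :: rest, q, cur, args =>
    if (c == '\'' || c == '"') && q.isNone then pvLoop2 rest (some c) (cur ++ [c]) args
    else if q == some c then pvLoop2 rest none (cur ++ [c]) args
    else if c == ',' && q.isNone then pvLoop2 rest q [] (args ++ [pvFlush cur])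
    else pvLoop2 rest q (cur ++ [c]) args

def parse_claude_natural (input_string : String) : Option (List String) :=
  let cs := input_string.toList
  if cs = [] ∨ ¬ (PySem.Chars.isIn "fileManager(".toList cs = true) then none
  else
    -- find ≥ 0 here because of the guard, so toNat is exact
    let start : Nat := (PySem.Chars.find cs "fileManager(".toList).toNat + 12
    let suffix := cs.drop start
    let endRel : Nat := match pvLoop1 suffix none 1 with
      | none => 0          -- end = start
      | some k => k
    let args_str := suffix.take endRel   -- input_string[start:end]
    let (cur, args) := pvLoop2 args_str none [] []
    some ((if PySem.Chars.strip cur ≠ [] then args ++ [pvFlush cur] else args).map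
      (fun l => String.ofList l))

-- ===== PORT B =====
-- B's single fused pass: quote state, paren depth, current arg and args together;
-- none = the closing ')' was never reached
def pvLoopB : List Char → Option Char → Int → List Char → List (List Char) →
    Option (List Char × List (List Char))
  | [], _, _, _, _ => none
  | c :: rest, q, pc, cur, args =>
    if (c == '\'' || c == '"') && q.isNone then pvLoopB rest (some c) pc (cur ++ [c]) args
    else if q == some c then pvLoopB rest none pc (cur ++ [c]) args
    else if q.isNone then
      if c == '(' then pvLoopB rest q (pc + 1) (cur ++ [c]) args
      else if c == ')' then
        if pc - 1 == 0 then some (cur, args) else pvLoopB rest q (pc - 1) (cur ++ [c]) args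
      else if c == ',' then pvLoopB rest q pc [] (args ++ [pvFlush cur])
      else pvLoopB rest q pc (cur ++ [c]) args
    else pvLoopB rest q pc (cur ++ [c]) args

def parse_claude_natural_alt (input_string : String) : Option (List String) :=
  let cs := input_string.toList
  if cs = [] ∨ ¬ (PySem.Chars.isIn "fileManager(".toList cs = true) then none
  else
    let start : Nat := (PySem.Chars.find cs "fileManager(".toList).toNat + 12
    match pvLoopB (cs.drop start) none 1 [] [] with
    | none => some []      -- never closed
    | some (cur, args) =>
      some ((if PySem.Chars.strip cur ≠ [] then args ++ [pvFlush cur] else args).map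
        (fun l => String.ofList l))

-- ===== PRECONDITION & SPEC =====
def Spec_parse_claude_natural (input_string : String) (out : Option (List String)) : Prop := out = parse_claude_natural_alt input_string
instance (input_string : String) (out : Option (List String)) : Decidable (Spec_parse_claude_natural input_string out) := by unfold Spec_parse_claude_natural; infer_instance

-- ===== CLAIM (what is proved, stated in full; the proofs are below) =====
def Claim_equal_parse_claude_natural : Prop := ∀ (input_string : String), Dom_parse_claude_natural input_string → Spec_parse_claude_natural input_string (parse_claude_natural input_string)

-- ===== LEMMAS AND PROOFS =====

-- the fused pass equals "find the end, then split the taken prefix"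
theorem pvLoopB_eq (cs : List Char) : ∀ (q : Option Char) (pc : Int) (cur : List Char)
    (args : List (List Char)),
    pvLoopB cs q pc cur args =
      (pvLoop1 cs q pc).map (fun k => pvLoop2 (cs.take k) q cur args) := by
  induction cs with
  | nil => intro q pc cur args; rfl
  | cons c rest ih =>
    intro q pc cur args
    simp only [pvLoopB, pvLoop1]
    split_ifs with h1 h2 h3 h4 h5 h6 h7 <;>
      first
      | rfl
      | (rw [ih, Option.map_map]
         apply congrArg (Option.map · _)
         funext k
         simp only [Function.comp_apply, List.take_succ_cons, pvLoop2]
         first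
         | rfl
         | (split_ifs <;> simp_all))

theorem pvBody_eq (t : List Char) :
    some ((if PySem.Chars.strip (pvLoop2 (t.take (match pvLoop1 t none 1 with | none => 0 | some k => k)) none [] []).1 ≠ [] then
        (pvLoop2 (t.take (match pvLoop1 t none 1 with | none => 0 | some k => k)) none [] []).2 ++ [pvFlush (pvLoop2 (t.take (match pvLoop1 t none 1 with | none => 0 | some k => k)) none [] []).1]
      else (pvLoop2 (t.take (match pvLoop1 t none 1 with | none => 0 | some k => k)) none [] []).2).map (fun l => String.ofList l)) =
    (match pvLoopB t none 1 [] [] with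
      | none => some []
      | some (cur, args) =>
        some ((if PySem.Chars.strip cur ≠ [] then args ++ [pvFlush cur] else args).map (fun l => String.ofList l))) := by
  rw [pvLoopB_eq]
  cases h : pvLoop1 t none 1 with
  | none => simp only [Option.map_none, List.take_zero, pvLoop2]; decide
  | some k => simp only [Option.map_some]

theorem parse_claude_natural_spec : Claim_equal_parse_claude_natural := by
  intro s _
  unfold Spec_parse_claude_natural parse_claude_natural parse_claude_natural_alt
  dsimp only
  by_cases hg : s.toList = [] ∨ ¬ PySem.Chars.isIn "fileManager(".toList s.toList = true
  · rw [if_pos hg, if_pos hg]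
  · rw [if_neg hg, if_neg hg]
    exact pvBody_eq _
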